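-- pv_equiv track=rewrite | github.com/super30admin/Binary-Search-3.1 | air_routes.py | closestPairs
-- ===== SOURCE A (Python) =====
-- def closestPairs(arr1,arr2,target):
--         arr1.sort(key=lambda x: x[1])
--         arr2.sort(key=lambda x: x[1])
--
--         res = []
--         max_sum = float("-inf")
--
--         i, j = 0, len(arr2) - 1
--
--         while i < len(arr1) and j >= 0:
--             val1 = arr1[i][1]
--             val2 = arr2[j][1]
--             total = val1 + val2
--
--             if total > target:
--                 j -= 1
--             else:
--                 if total > max_sum:
--                     max_sum = total
--                     res = [[arr1[i][0], arr2[j][0]]]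
--                 elif total == max_sum:
--                     res.append([arr1[i][0], arr2[j][0]])
--                 i += 1
--
--         return res
-- ===== SOURCE B (Python) =====
-- def closestPairs(arr1, arr2, target):
--     # Note: like A, sorts arr1 and arr2 in place (same observable mutation).
--     arr1.sort(key=lambda x: x[1])
--     arr2.sort(key=lambda x: x[1])
--     vals = [b[1] for b in arr2]
--     best = None
--     res = []
--     for a in arr1:
--         th = target - a[1]
--         # rightmost index lo-1 with vals[lo-1] <= th (hand-rolled bisect_right)
--         lo, hi = 0, len(vals)
--         while lo < hi:
--             mid = (lo + hi) // 2
--             if vals[mid] <= th: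
--                 lo = mid + 1
--             else:
--                 hi = mid
--         if lo == 0:
--             continue
--         b = arr2[lo - 1]
--         total = a[1] + b[1]
--         if best is None or total > best:
--             best = total
--             res = [[a[0], b[0]]]
--         elif total == best:
--             res.append([a[0], b[0]])
--     return res
-- ===== Notes on version B (the rewrite author's own statement) =====
-- stated objective: alternative
-- what changed: Replaced the coupled two-pointer sweep over both sorted arrays by an independent hand-rolled binary search (bisect_right) into arr2's sorted values for each element of arr1, with a running best-sum accumulator instead of a float('-inf') sentinel.
import Mathlib
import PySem

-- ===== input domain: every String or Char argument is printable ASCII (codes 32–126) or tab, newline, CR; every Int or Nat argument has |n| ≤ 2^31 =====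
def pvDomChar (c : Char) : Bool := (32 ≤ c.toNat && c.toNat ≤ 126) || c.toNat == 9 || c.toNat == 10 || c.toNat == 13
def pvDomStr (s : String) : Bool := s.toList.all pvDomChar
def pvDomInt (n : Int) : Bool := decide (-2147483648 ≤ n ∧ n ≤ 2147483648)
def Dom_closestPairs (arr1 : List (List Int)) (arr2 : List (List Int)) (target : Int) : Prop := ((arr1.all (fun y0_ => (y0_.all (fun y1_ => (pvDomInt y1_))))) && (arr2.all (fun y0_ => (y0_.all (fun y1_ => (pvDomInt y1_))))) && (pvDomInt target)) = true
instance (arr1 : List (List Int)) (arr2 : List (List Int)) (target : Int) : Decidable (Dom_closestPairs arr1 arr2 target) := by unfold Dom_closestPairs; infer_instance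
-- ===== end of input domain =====

-- B replaces A's coupled two-pointer sweep by a per-element binary search into arr2's
-- sorted second values (same return value; like A, both Pythons sort arr1/arr2 in place).


-- ===== PORT A =====
-- x[0] / x[1]; exact under Pre_ (every inner list has length ≥ 2, so the index is in range)
def pvFst (x : List Int) : Int := x.getD 0 0
def pvSnd (x : List Int) : Int := x.getD 1 0
-- total > max_sum / total == max_sum with max_sum = float('-inf') encoded as none
def pvGtMax (t : Int) (m : Option Int) : Bool := match m with | none => true | some v => v < t
def pvEqMax (t : Int) (m : Option Int) : Bool := match m with | none => false | some v => t = v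

-- the while-loop of A; i and j stay in range when used (guards i < len, 0 ≤ j), so
-- getD / .toNat indexing is exact; fuel bounds the number of iterations (≤ len1+len2)
def loopA (s1 s2 : List (List Int)) (target : Int) : Nat → Nat → Int → Option Int → List (List Int) → List (List Int)
  | 0, _, _, _, res => res
  | fuel+1, i, j, maxSum, res =>
    if i < s1.length ∧ 0 ≤ j then
      let val1 := pvSnd (s1.getD i [])
      let val2 := pvSnd (s2.getD j.toNat [])
      let total := val1 + val2
      if target < total then
        loopA s1 s2 target fuel i (j-1) maxSum res
      else
        if pvGtMax total maxSum then
          loopA s1 s2 target fuel (i+1) j (some total) [[pvFst (s1.getD i []), pvFst (s2.getD j.toNat [])]]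
        else if pvEqMax total maxSum then
          loopA s1 s2 target fuel (i+1) j maxSum (res ++ [[pvFst (s1.getD i []), pvFst (s2.getD j.toNat [])]])
        else
          loopA s1 s2 target fuel (i+1) j maxSum res
    else res

def closestPairs (arr1 : List (List Int)) (arr2 : List (List Int)) (target : Int) : List (List Int) :=
  let s1 := PySem.List.sorted arr1 (fun x => pvSnd x) false
  let s2 := PySem.List.sorted arr2 (fun x => pvSnd x) false
  loopA s1 s2 target (s1.length + s2.length + 1) 0 ((s2.length : Int) - 1) none []

-- ===== PORT B =====
-- Source B's hand-rolled bisect_right loop (while lo < hi …); fuel ≥ hi-lo suffices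
def bsLoop (vals : List Int) (th : Int) : Nat → Nat → Nat → Nat
  | 0, lo, _ => lo
  | fuel+1, lo, hi =>
    if lo < hi then
      let mid := (lo + hi) / 2
      if vals.getD mid 0 ≤ th then bsLoop vals th fuel (mid+1) hi
      else bsLoop vals th fuel lo mid
    else lo

-- Source B's 'for a in arr1' loop; best = None encoded as none
def loopB (s2 : List (List Int)) (vals : List Int) (target : Int) : List (List Int) → Option Int → List (List Int) → List (List Int)
  | [], _, res => res
  | a :: rest, best, res =>
    let th := target - pvSnd a
    let lo := bsLoop vals th (vals.length + 1) 0 vals.length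
    if lo = 0 then loopB s2 vals target rest best res
    else
      let b := s2.getD (lo - 1) []
      let total := pvSnd a + pvSnd b
      if pvGtMax total best then loopB s2 vals target rest (some total) [[pvFst a, pvFst b]]
      else if pvEqMax total best then loopB s2 vals target rest best (res ++ [[pvFst a, pvFst b]])
      else loopB s2 vals target rest best res

def closestPairs_alt (arr1 : List (List Int)) (arr2 : List (List Int)) (target : Int) : List (List Int) :=
  let s1 := PySem.List.sorted arr1 (fun x => pvSnd x) false
  let s2 := PySem.List.sorted arr2 (fun x => pvSnd x) false
  let vals := s2.map (fun b => pvSnd b)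
  loopB s2 vals target s1 none []

-- ===== PRECONDITION & SPEC =====
-- Pre_ excludes exactly the inputs where both Pythons raise IndexError: some inner list
-- shorter than 2, so the sort key x[1] (or x[0] later) has no element.
def Pre_closestPairs (arr1 : List (List Int)) (arr2 : List (List Int)) (target : Int) : Prop :=
  (∀ x ∈ arr1, 2 ≤ x.length) ∧ (∀ x ∈ arr2, 2 ≤ x.length)
instance (arr1 : List (List Int)) (arr2 : List (List Int)) (target : Int) : Decidable (Pre_closestPairs arr1 arr2 target) := by unfold Pre_closestPairs; infer_instance
def pvWitness_closestPairs : List (List Int) × List (List Int) × Int := ([[1, 2], [4, 5]], [[3, 4], [6, 7]], 10)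

def Spec_closestPairs (arr1 : List (List Int)) (arr2 : List (List Int)) (target : Int) (out : List (List Int)) : Prop := out = closestPairs_alt arr1 arr2 target
instance (arr1 : List (List Int)) (arr2 : List (List Int)) (target : Int) (out : List (List Int)) : Decidable (Spec_closestPairs arr1 arr2 target out) := by unfold Spec_closestPairs; infer_instance

-- ===== CLAIM (what is proved, stated in full; the proofs are below) =====
def Claim_equal_closestPairs : Prop := ∀ (arr1 : List (List Int)) (arr2 : List (List Int)) (target : Int), Dom_closestPairs arr1 arr2 target → Pre_closestPairs arr1 arr2 target → Spec_closestPairs arr1 arr2 target (closestPairs arr1 arr2 target)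

-- ===== LEMMAS AND PROOFS =====

-- monotone access into a (≤)-sorted list of Ints
theorem pairwise_getD_le (v : List Int) (h : v.Pairwise (· ≤ ·)) (a b : Nat)
    (hab : a ≤ b) (hb : b < v.length) : v.getD a 0 ≤ v.getD b 0 := by
  have ha : a < v.length := lt_of_le_of_lt hab hb
  rw [List.getD_eq_getElem v 0 ha, List.getD_eq_getElem v 0 hb]
  rcases Nat.lt_or_ge a b with hlt | hge
  · exact (List.pairwise_iff_getElem.mp h) a b ha hb hlt
  · have : a = b := le_antisymm hab hge
    subst this; exact le_refl _

-- "n is the insertion point of th" (bisect_right position)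
def IsIns (vals : List Int) (th : Int) (n : Nat) : Prop :=
  n ≤ vals.length ∧ (∀ k, k < n → vals.getD k 0 ≤ th) ∧
    (∀ k, n ≤ k → k < vals.length → th < vals.getD k 0)

theorem isIns_unique {vals : List Int} {th : Int} {n m : Nat}
    (h1 : IsIns vals th n) (h2 : IsIns vals th m) : n = m := by
  obtain ⟨hn, hp1, hs1⟩ := h1
  obtain ⟨hm, hp2, hs2⟩ := h2
  by_contra hne
  rcases Nat.lt_or_ge n m with h | h
  · have a1 := hp2 n h
    have a2 := hs1 n (le_refl n) (lt_of_lt_of_le h hm)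
    omega
  · have h' : m < n := lt_of_le_of_ne h (Ne.symm hne)
    have a1 := hp1 m h'
    have a2 := hs2 m (le_refl m) (lt_of_lt_of_le h' hn)
    omega

theorem bsLoop_isIns (vals : List Int) (th : Int) (hs : vals.Pairwise (· ≤ ·)) :
    ∀ fuel lo hi, hi - lo ≤ fuel → lo ≤ hi → hi ≤ vals.length →
    (∀ k, k < lo → vals.getD k 0 ≤ th) →
    (∀ k, hi ≤ k → k < vals.length → th < vals.getD k 0) →
    IsIns vals th (bsLoop vals th fuel lo hi) := by
  intro fuel
  induction fuel with
  | zero =>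
    intro lo hi hf hlh hhl hp hsf
    have : lo = hi := by omega
    subst this
    exact ⟨hhl, hp, fun k hk hkl => hsf k hk hkl⟩
  | succ fuel ih =>
    intro lo hi hf hlh hhl hp hsf
    simp only [bsLoop]
    by_cases hlt : lo < hi
    · simp only [hlt, if_true]
      by_cases hmid : vals.getD ((lo + hi) / 2) 0 ≤ th
      · simp only [hmid, if_true]
        refine ih ((lo + hi) / 2 + 1) hi (by omega) (by omega) hhl ?_ hsf
        intro k hk
        rcases Nat.lt_or_ge k lo with h | h
        · exact hp k h
        · exact le_trans (pairwise_getD_le vals hs k ((lo + hi) / 2) (by omega) (by omega)) hmid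
      · simp only [hmid, if_false]
        refine ih lo ((lo + hi) / 2) (by omega) (by omega) (by omega) hp ?_
        intro k hk hkl
        have := pairwise_getD_le vals hs ((lo + hi) / 2) k hk hkl
        omega
    · simp only [hlt, if_false]
      have : lo = hi := by omega
      subst this
      exact ⟨hhl, hp, fun k hk hkl => hsf k hk hkl⟩

-- when every remaining threshold is below all of vals, loopB adds nothing
theorem loopB_all_zero (s2 : List (List Int)) (vals : List Int) (target : Int)
    (hs : vals.Pairwise (· ≤ ·)) :
    ∀ l best res, (∀ a ∈ l, ∀ k, k < vals.length → target - pvSnd a < vals.getD k 0) →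
    loopB s2 vals target l best res = res := by
  intro l
  induction l with
  | nil => intro best res _; rfl
  | cons a rest ih =>
    intro best res h
    have hzero : bsLoop vals (target - pvSnd a) (vals.length + 1) 0 vals.length = 0 := by
      have h1 : IsIns vals (target - pvSnd a) (bsLoop vals (target - pvSnd a) (vals.length + 1) 0 vals.length) :=
        bsLoop_isIns vals (target - pvSnd a) hs (vals.length + 1) 0 vals.length (by omega)
          (by omega) (le_refl _) (by omega) (by omega)
      have h0 : IsIns vals (target - pvSnd a) 0 :=
        ⟨Nat.zero_le _, by omega, fun k _ hk => h a (List.mem_cons_self) k hk⟩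
      exact isIns_unique h1 h0
    simp only [loopB, hzero]
    exact ih best res (fun a' ha' => h a' (List.mem_cons_of_mem a ha'))

-- main bridge: the two-pointer loop equals the per-element binary-search loop
theorem loopA_eq_loopB (s1 s2 : List (List Int)) (target : Int)
    (hs2 : (s2.map pvSnd).Pairwise (· ≤ ·)) :
    ∀ fuel (i : Nat) (j : Int) best res,
      (s1.length - i) + (j + 1).toNat ≤ fuel →
      j < (s2.length : Int) →
      (s1.drop i).Pairwise (fun a b => pvSnd a ≤ pvSnd b) →
      (∀ k : Nat, j < (k : Int) → k < s2.length →
        ∀ a ∈ s1.drop i, target - pvSnd a < (s2.map pvSnd).getD k 0) →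
      loopA s1 s2 target fuel i j best res = loopB s2 (s2.map pvSnd) target (s1.drop i) best res := by
  have hlen : (s2.map pvSnd).length = s2.length := by simp
  have hval : ∀ k : Nat, k < s2.length → (s2.map pvSnd).getD k 0 = pvSnd (s2.getD k []) := by
    intro k hk
    rw [List.getD_eq_getElem _ 0 (by simpa using hk), List.getD_eq_getElem _ [] hk, List.getElem_map]
  intro fuel
  induction fuel with
  | zero =>
    intro i j best res hf hj hpw hinv
    have hi : s1.length ≤ i := by omega
    rw [List.drop_eq_nil_of_le hi]
    rfl
  | succ fuel ih =>
    intro i j best res hf hj hpw hinv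
    simp only [loopA]
    by_cases hc : i < s1.length ∧ 0 ≤ j
    · obtain ⟨hi, hj0⟩ := hc
      simp only [if_pos (And.intro hi hj0)]
      have hdrop : s1.drop i = s1[i] :: s1.drop (i + 1) := List.drop_eq_getElem_cons hi
      have hgetDi : s1.getD i [] = s1[i] := List.getD_eq_getElem s1 [] hi
      have hjlt : j.toNat < s2.length := by omega
      have hv2 : pvSnd (s2.getD j.toNat []) = (s2.map pvSnd).getD j.toNat 0 := (hval j.toNat hjlt).symm
      by_cases hgt : target < pvSnd (s1.getD i []) + pvSnd (s2.getD j.toNat [])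
      · simp only [if_pos hgt]
        rw [ih i (j - 1) best res (by omega) (by omega) hpw ?_]
        intro k hk hkl a ha
        by_cases hkj : j < (k : Int)
        · exact hinv k hkj hkl a ha
        · have hk' : k = j.toNat := by omega
          subst hk'
          have hpw' := hpw
          rw [hdrop] at hpw'
          have hle : pvSnd (s1.getD i []) ≤ pvSnd a := by
            rw [hgetDi]
            rcases List.mem_cons.mp (hdrop ▸ ha) with heq | hmem
            · rw [heq]
            · exact (List.pairwise_cons.mp hpw').1 a hmem
          rw [← hv2]
          omega
      · simp only [if_neg hgt]
        have hmem_head : s1.getD i [] ∈ s1.drop i := by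
          rw [hdrop, hgetDi]; exact List.mem_cons_self
        have hIns : IsIns (s2.map pvSnd) (target - pvSnd (s1.getD i [])) (j.toNat + 1) := by
          refine ⟨by omega, ?_, ?_⟩
          · intro k hk
            have h1 : (s2.map pvSnd).getD k 0 ≤ (s2.map pvSnd).getD j.toNat 0 :=
              pairwise_getD_le _ hs2 k j.toNat (by omega) (by omega)
            rw [← hv2] at h1
            omega
          · intro k hk hkl
            exact hinv k (by omega) (by omega) (s1.getD i []) hmem_head
        have hbs : bsLoop (s2.map pvSnd) (target - pvSnd (s1.getD i []))
            ((s2.map pvSnd).length + 1) 0 (s2.map pvSnd).length = j.toNat + 1 := by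
          refine isIns_unique ?_ hIns
          exact bsLoop_isIns _ _ hs2 _ 0 _ (by omega) (by omega) (le_refl _) (by omega) (by omega)
        rw [hdrop]
        simp only [loopB, hgetDi.symm, hbs, Nat.add_sub_cancel]
        simp only [Nat.succ_ne_zero, if_false]
        have ihgoal : ∀ best' res',
            loopA s1 s2 target fuel (i + 1) j best' res' =
              loopB s2 (s2.map pvSnd) target (s1.drop (i + 1)) best' res' := by
          intro best' res'
          refine ih (i + 1) j best' res' (by omega) hj ?_ ?_
          · have hpw' := hpw
            rw [hdrop] at hpw'
            exact (List.pairwise_cons.mp hpw').2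
          · intro k hk hkl a ha
            refine hinv k hk hkl a ?_
            rw [hdrop]
            exact List.mem_cons_of_mem _ ha
        by_cases h1 : pvGtMax (pvSnd (s1.getD i []) + pvSnd (s2.getD j.toNat [])) best = true
        · simp only [h1, if_true]
          exact ihgoal _ _
        · simp only [h1]
          by_cases h2 : pvEqMax (pvSnd (s1.getD i []) + pvSnd (s2.getD j.toNat [])) best = true
          · simp only [h2, if_true]
            exact ihgoal _ _
          · simp only [h2]
            exact ihgoal _ _
    · simp only [if_neg hc]
      by_cases hi : i < s1.length
      · have hj0 : j < 0 := by
          rcases not_and_or.mp hc with h | h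
          · exact absurd hi h
          · omega
        rw [loopB_all_zero s2 (s2.map pvSnd) target hs2 _ best res ?_]
        intro a ha k hk
        exact hinv k (by omega) (by omega) a ha
      · rw [List.drop_eq_nil_of_le (by omega)]
        rfl

-- ===== VERDICT (by name: the statement is the Claim_ definition above) =====
theorem closestPairs_spec : Claim_equal_closestPairs := by
  intro arr1 arr2 target _dom _pre
  unfold Spec_closestPairs closestPairs closestPairs_alt
  have h := loopA_eq_loopB (PySem.List.sorted arr1 (fun x => pvSnd x) false)
      (PySem.List.sorted arr2 (fun x => pvSnd x) false) target
      (PySem.List.sorted_map_key_pairwise arr2 (fun x => pvSnd x))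
      ((PySem.List.sorted arr1 (fun x => pvSnd x) false).length +
        (PySem.List.sorted arr2 (fun x => pvSnd x) false).length + 1)
      0 (((PySem.List.sorted arr2 (fun x => pvSnd x) false).length : Int) - 1) none []
      (by omega) (by omega)
      (by simpa using PySem.List.sorted_pairwise arr1 (fun x => pvSnd x))
      (by intro k hk hkl a ha; omega)
  rw [List.drop_zero] at h
  exact h
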